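-- pv_equiv track=rewrite | github.com/cmplx-xyttmt/competitive-programming | python/src/atcoder/arc139/A.py | find_min_add
-- ===== SOURCE A (Python) =====
-- def find_min_add(shift, p2, prev):
--     left = -1
--     right = (2 * prev) // (1 << shift)
--     while right - left > 1:
--         mid = (left + right) // 2
--         val = (mid << shift) + p2
--         if val > prev:
--             right = mid
--         else:
--             left = mid
--
--     return right
-- ===== SOURCE B (Python) =====
-- def find_min_add(shift, p2, prev):
--     # Closed form: the loop is a binary search for the smallest mid >= 0 with
--     # (mid << shift) + p2 > prev, clamped to the initial right bound.
--     s = 1 << shift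
--     right = (2 * prev) // s
--     t = (prev - p2) // s + 1
--     return min(max(t, 0), right)
-- ===== Notes on version B (the rewrite author's own statement) =====
-- stated objective: faster
-- what changed: Replaces A's binary-search loop with a closed-form floor-division threshold (prev-p2)//(1<<shift)+1 clamped to [0, (2*prev)//(1<<shift)].
import Mathlib
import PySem

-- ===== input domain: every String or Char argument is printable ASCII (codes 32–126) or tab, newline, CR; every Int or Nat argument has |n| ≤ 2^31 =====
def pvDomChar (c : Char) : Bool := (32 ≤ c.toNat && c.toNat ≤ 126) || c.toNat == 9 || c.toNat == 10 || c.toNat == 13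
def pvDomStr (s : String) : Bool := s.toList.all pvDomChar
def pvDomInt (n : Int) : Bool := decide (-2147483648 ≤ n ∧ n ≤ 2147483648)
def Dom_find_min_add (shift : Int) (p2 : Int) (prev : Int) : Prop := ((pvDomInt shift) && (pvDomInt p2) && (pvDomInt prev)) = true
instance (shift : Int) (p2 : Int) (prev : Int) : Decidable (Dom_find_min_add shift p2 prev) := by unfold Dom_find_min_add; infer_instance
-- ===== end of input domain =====

-- B replaces A's binary-search loop by the closed-form threshold (prev-p2)//(1<<shift)+1
-- clamped to [0, (2*prev)//(1<<shift)] (objective: faster, O(1) vs O(log prev)).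

-- ===== PORT A =====
-- the while loop of A; Python's 'mid << shift' = mid * 2^shift (shift ≥ 0 by Pre_)
def findMinAddLoop (shift : Int) (p2 : Int) (prev : Int) (left : Int) (right : Int) : Int :=
  if h : right - left > 1 then
    let mid := PySem.Int.floordiv (left + right) 2
    if (mid <<< shift.toNat) + p2 > prev then
      findMinAddLoop shift p2 prev left mid
    else
      findMinAddLoop shift p2 prev mid right
  else right
termination_by (right - left).toNat
decreasing_by
  · have hb := PySem.Int.floordiv_two_mid_bounds (lo := left + 1) (hi := right - 1) (by omega)
    have he : left + 1 + (right - 1) = left + right := by ring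
    rw [he] at hb
    simp only [PySem.Int.floordiv] at *
    omega
  · have hb := PySem.Int.floordiv_two_mid_bounds (lo := left + 1) (hi := right - 1) (by omega)
    have he : left + 1 + (right - 1) = left + right := by ring
    rw [he] at hb
    simp only [PySem.Int.floordiv] at *
    omega

-- 'mid = (left + right) // 2' uses floordiv; '1 << shift' = 1 <<< shift.toNat (exact for
-- shift ≥ 0; Python raises ValueError for negative shift, excluded by Pre_)
def find_min_add (shift : Int) (p2 : Int) (prev : Int) : Int :=
  findMinAddLoop shift p2 prev (-1) (PySem.Int.floordiv (2 * prev) ((1 : Int) <<< shift.toNat))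

-- ===== PORT B =====
def find_min_add_alt (shift : Int) (p2 : Int) (prev : Int) : Int :=
  let s : Int := (1 : Int) <<< shift.toNat   -- 1 << shift, exact for shift ≥ 0 (Pre_)
  let right := PySem.Int.floordiv (2 * prev) s
  let t := PySem.Int.floordiv (prev - p2) s + 1
  min (max t 0) right

-- ===== PRECONDITION & SPEC =====
-- Pre_ excludes negative shift, on which Python's '1 << shift' raises ValueError.
def Pre_find_min_add (shift : Int) (p2 : Int) (prev : Int) : Prop := 0 ≤ shift
instance (shift : Int) (p2 : Int) (prev : Int) : Decidable (Pre_find_min_add shift p2 prev) := by unfold Pre_find_min_add; infer_instance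
def pvWitness_find_min_add : Int × Int × Int := (2, 3, 17)

def Spec_find_min_add (shift : Int) (p2 : Int) (prev : Int) (out : Int) : Prop := out = find_min_add_alt shift p2 prev
instance (shift : Int) (p2 : Int) (prev : Int) (out : Int) : Decidable (Spec_find_min_add shift p2 prev out) := by unfold Spec_find_min_add; infer_instance

-- ===== CLAIM (what is proved, stated in full; the proofs are below) =====
def Claim_equal_find_min_add : Prop := ∀ (shift : Int) (p2 : Int) (prev : Int), Dom_find_min_add shift p2 prev → Pre_find_min_add shift p2 prev → Spec_find_min_add shift p2 prev (find_min_add shift p2 prev)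

-- ===== LEMMAS AND PROOFS =====

-- The predicate 'mid*2^k + p2 > prev' is 'mid ≥ t' for t = (prev-p2)//2^k + 1.
lemma pred_iff_ge (k : Nat) (p2 prev m : Int) :
    (m <<< k) + p2 > prev ↔ PySem.Int.floordiv (prev - p2) ((1 : Int) <<< k) + 1 ≤ m := by
  have hs : (0 : Int) < (1 : Int) <<< k := by
    rw [Int.shiftLeft_eq]
    positivity
  rw [Int.shiftLeft_eq]
  constructor
  · intro h
    by_contra hc
    push_neg at hc
    have hm : m ≤ PySem.Int.floordiv (prev - p2) ((1 : Int) <<< k) := by omega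
    have := (PySem.Int.le_floordiv_iff_mul_le (a := prev - p2) (b := (1 : Int) <<< k)
      (q := m) hs).mp hm
    rw [Int.shiftLeft_eq] at this
    simp at this
    omega
  · intro h
    have hm : PySem.Int.floordiv (prev - p2) ((1 : Int) <<< k) < m := by omega
    have := (PySem.Int.floordiv_lt_iff_lt_mul (a := prev - p2) (b := (1 : Int) <<< k)
      (q := m) hs).mp hm
    rw [Int.shiftLeft_eq] at this
    simp at this
    nlinarith

-- Loop invariant: with left ≥ -1 and left below the clamped threshold t' = max t 0,
-- the binary search returns min t' right.
lemma loop_closed (shift : Int) (p2 : Int) (prev : Int) (left right : Int)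
    (h1 : -1 ≤ left)
    (h2 : left < max (PySem.Int.floordiv (prev - p2) ((1 : Int) <<< shift.toNat) + 1) 0) :
    findMinAddLoop shift p2 prev left right =
      min (max (PySem.Int.floordiv (prev - p2) ((1 : Int) <<< shift.toNat) + 1) 0) right := by
  set t' := max (PySem.Int.floordiv (prev - p2) ((1 : Int) <<< shift.toNat) + 1) 0 with ht'
  rw [findMinAddLoop]
  split_ifs with h
  · have hmid := PySem.Int.floordiv_two_mid_bounds (lo := left + 1) (hi := right - 1) (by omega)
    set mid := PySem.Int.floordiv (left + right) 2 with hm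
    have hmid' : left + 1 ≤ mid ∧ mid ≤ right - 1 := by
      simpa [hm, PySem.Int.floordiv] using hmid
    have hmid0 : 0 ≤ mid := by omega
    by_cases hp : (mid <<< shift.toNat) + p2 > prev
    · simp only [hp, if_true]
      have hge : PySem.Int.floordiv (prev - p2) ((1 : Int) <<< shift.toNat) + 1 ≤ mid :=
        (pred_iff_ge shift.toNat p2 prev mid).mp hp
      have htm : t' ≤ mid := by omega
      have := loop_closed shift p2 prev left mid h1 h2
      rw [this]
      omega
    · simp only [hp, if_false]
      have hlt : ¬ (PySem.Int.floordiv (prev - p2) ((1 : Int) <<< shift.toNat) + 1 ≤ mid) :=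
        fun hx => hp ((pred_iff_ge shift.toNat p2 prev mid).mpr hx)
      push_neg at hlt
      have h2' : mid < t' := by omega
      exact loop_closed shift p2 prev mid right (by omega) h2'
  · omega
termination_by (right - left).toNat
decreasing_by
  · have hb := PySem.Int.floordiv_two_mid_bounds (lo := left + 1) (hi := right - 1) (by omega)
    have he : left + 1 + (right - 1) = left + right := by ring
    rw [he] at hb
    simp only [PySem.Int.floordiv] at *
    omega
  · have hb := PySem.Int.floordiv_two_mid_bounds (lo := left + 1) (hi := right - 1) (by omega)
    have he : left + 1 + (right - 1) = left + right := by ring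
    rw [he] at hb
    simp only [PySem.Int.floordiv] at *
    omega

-- ===== VERDICT (by name: the statement is the Claim_ definition above) =====
theorem find_min_add_spec : Claim_equal_find_min_add := by
  intro shift p2 prev _ _
  unfold Spec_find_min_add find_min_add find_min_add_alt
  rw [loop_closed shift p2 prev (-1) _ (by omega) (by omega)]
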